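-- pv_equiv track=rewrite | github.com/ShaiDahan-code/Introduction-to-Computer-Science-in-Python-Course | Home Work - Python/Home Work 3 Calender/calendar.py | day_untail_year
-- ===== SOURCE A (Python) =====
-- def check_if_year_is_loap(year):
--     "this for check if year is loop or not"
--     if year%400 == 0 or (year%4 == 0 and not year%100 == 0):
--         return True
--     else:
--         return False
--
-- def day_untail_year(year):
--     "count all days untail year was input if year was loop it's add 366 days if not it's add 365"
--     days = 0
--     for i in range(0,(year-1899)):
--         if check_if_year_is_loap(year - i) == True:
--             days += 366
--         elif check_if_year_is_loap(year - i) ==False: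
--             days += 365
--     return days
-- ===== SOURCE B (Python) =====
-- def _leaps_through(y):
--     "number of leap years in 1..y (y >= 0)"
--     return y // 4 - y // 100 + y // 400
--
-- def day_untail_year(year):
--     if year < 1900:
--         return 0
--     n = year - 1899
--     return 365 * n + _leaps_through(year) - _leaps_through(1899)
-- ===== Notes on version B (the rewrite author's own statement) =====
-- stated objective: faster
-- what changed: Replaced the per-year loop that tests each year from 1900 to `year` for leapness by an O(1) closed form: 365*(year-1899) plus the leap-year count obtained from floor divisions by 4, 100 and 400.
import Mathlib
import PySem

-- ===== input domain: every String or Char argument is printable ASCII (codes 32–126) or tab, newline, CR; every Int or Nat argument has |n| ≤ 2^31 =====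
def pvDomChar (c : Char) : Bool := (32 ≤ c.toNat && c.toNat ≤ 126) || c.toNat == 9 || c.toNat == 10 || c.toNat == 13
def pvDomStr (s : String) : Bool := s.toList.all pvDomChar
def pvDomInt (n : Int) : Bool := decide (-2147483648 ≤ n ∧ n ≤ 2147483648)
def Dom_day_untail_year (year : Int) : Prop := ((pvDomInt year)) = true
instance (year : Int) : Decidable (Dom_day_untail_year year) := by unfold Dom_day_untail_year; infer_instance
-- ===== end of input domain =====

-- B replaces A's O(year) loop over every year since 1900 by the O(1) closed form
-- 365*(year-1899) plus a leap-year count via floor divisions by 4/100/400 (objective: faster).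

-- ===== PORT A =====
def check_if_year_is_loap (year : Int) : Bool :=
  if PySem.Int.mod year 400 == 0 || (PySem.Int.mod year 4 == 0 && !(PySem.Int.mod year 100 == 0)) then
    true
  else
    false

def day_untail_year (year : Int) : Int :=
  (PySem.List.pyRange 0 (year - 1899) 1).foldl
    (fun days i =>
      if check_if_year_is_loap (year - i) == true then days + 366
      else if check_if_year_is_loap (year - i) == false then days + 365
      else days) 0

-- ===== PORT B =====
def leapsThrough (y : Int) : Int :=
  PySem.Int.floordiv y 4 - PySem.Int.floordiv y 100 + PySem.Int.floordiv y 400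

def day_untail_year_alt (year : Int) : Int :=
  if year < 1900 then 0
  else 365 * (year - 1899) + leapsThrough year - leapsThrough 1899

-- ===== PRECONDITION & SPEC =====
def Spec_day_untail_year (year : Int) (out : Int) : Prop := out = day_untail_year_alt year
instance (year : Int) (out : Int) : Decidable (Spec_day_untail_year year out) := by unfold Spec_day_untail_year; infer_instance

-- ===== CLAIM (what is proved, stated in full; the proofs are below) =====
def Claim_equal_day_untail_year : Prop := ∀ (year : Int), Dom_day_untail_year year → Spec_day_untail_year year (day_untail_year year)

-- ===== LEMMAS AND PROOFS =====

theorem leapsThrough_step (y : Int) :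
    leapsThrough y = leapsThrough (y - 1) + (if check_if_year_is_loap y = true then 1 else 0) := by
  have h4 : ∀ a : Int, PySem.Int.floordiv a 4 = a / 4 :=
    fun a => PySem.Int.floordiv_eq_ediv_of_pos (by norm_num)
  have h100 : ∀ a : Int, PySem.Int.floordiv a 100 = a / 100 :=
    fun a => PySem.Int.floordiv_eq_ediv_of_pos (by norm_num)
  have h400 : ∀ a : Int, PySem.Int.floordiv a 400 = a / 400 :=
    fun a => PySem.Int.floordiv_eq_ediv_of_pos (by norm_num)
  have hb : check_if_year_is_loap y = true ↔ (y % 400 = 0 ∨ (y % 4 = 0 ∧ ¬ y % 100 = 0)) := by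
    unfold check_if_year_is_loap
    simp
  by_cases hc : y % 400 = 0 ∨ (y % 4 = 0 ∧ ¬ y % 100 = 0)
  · rw [if_pos (hb.mpr hc)]
    unfold leapsThrough
    simp only [h4, h100, h400]
    omega
  · have hf : ¬ check_if_year_is_loap y = true := fun h => hc (hb.mp h)
    rw [if_neg hf, add_zero]
    unfold leapsThrough
    simp only [h4, h100, h400]
    omega

theorem foldl_leap (year : Int) : ∀ (n : Nat) (d : Int),
    (PySem.List.pyRange 0 (n : Int) 1).foldl
      (fun days i =>
        if check_if_year_is_loap (year - i) == true then days + 366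
        else if check_if_year_is_loap (year - i) == false then days + 365
        else days) d
    = d + 365 * (n : Int) + (leapsThrough year - leapsThrough (year - n)) := by
  intro n
  induction n with
  | zero =>
    intro d
    simp [PySem.List.pyRange_one_eq_nil (le_refl (0 : Int))]
  | succ n ih =>
    intro d
    have hcast : ((n + 1 : Nat) : Int) = (n : Int) + 1 := by push_cast; ring
    rw [hcast, PySem.List.pyRange_one_succ_right (Int.natCast_nonneg n), List.foldl_append, ih]
    have hstep := leapsThrough_step (year - n)
    have hy : year - ((n : Int) + 1) = (year - n) - 1 := by ring
    simp only [List.foldl_cons, List.foldl_nil, hy]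
    cases h : check_if_year_is_loap (year - n) <;> simp only [h] at hstep ⊢ <;>
      simp at hstep ⊢ <;> omega

theorem day_untail_year_spec : Claim_equal_day_untail_year := by
  intro year _
  unfold Spec_day_untail_year day_untail_year day_untail_year_alt
  by_cases hlt : year < 1900
  · rw [PySem.List.pyRange_one_eq_nil (by omega), if_pos hlt]
    simp
  · have hn : ((year - 1899).toNat : Int) = year - 1899 := by omega
    have := foldl_leap year (year - 1899).toNat 0
    rw [hn] at this
    rw [this, if_neg hlt]
    have h1899 : year - (year - 1899) = 1899 := by ring
    rw [h1899]
    ring
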